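-- pv_equiv track=rewrite | github.com/bien-fat/knowledge-training | knowlib/chat_utilities.py | chat_decode
-- ===== SOURCE A (Python) =====
-- def chat_decode(text, roles=None):
--     if roles is None:
--         roles = ["system", "user", "assistant"]
--
--     lines = text.strip().split('\n')
--     messages = []
--     current_role = None
--     current_content = []
--
--     for line in lines:
--         if line in roles:
--             if current_role is not None:
--                 messages.append({
--                     "role": current_role,
--                     "content": '\n'.join(current_content).strip()
--                 })
--             current_role = line
--             current_content = []
--         else:
--             current_content.append(line)
--
--     if current_role is not None:
--         messages.append({
--             "role": current_role,
--             "content": '\n'.join(current_content).strip()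
--         })
--
--     return messages
-- ===== SOURCE B (Python) =====
-- def chat_decode(text, roles=None):
--     if roles is None:
--         roles = ["system", "user", "assistant"]
--     lines = text.strip().split('\n')
--     i = 0
--     while i < len(lines) and lines[i] not in roles:
--         i += 1
--     messages = []
--     while i < len(lines):
--         role = lines[i]
--         j = i + 1
--         while j < len(lines) and lines[j] not in roles:
--             j += 1
--         messages.append({"role": role,
--                          "content": '\n'.join(lines[i + 1:j]).strip()})
--         i = j
--     return messages
-- ===== Notes on version B (the rewrite author's own statement) =====
-- stated objective: alternative
-- what changed: Replaces A's stateful accumulator loop (current_role/current_content with a final flush) by index-based greedy grouping: skip to the first role header, then for each header scan forward to the next header and slice the content between them, so no pending state or end-of-loop flush exists.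
import Mathlib
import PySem

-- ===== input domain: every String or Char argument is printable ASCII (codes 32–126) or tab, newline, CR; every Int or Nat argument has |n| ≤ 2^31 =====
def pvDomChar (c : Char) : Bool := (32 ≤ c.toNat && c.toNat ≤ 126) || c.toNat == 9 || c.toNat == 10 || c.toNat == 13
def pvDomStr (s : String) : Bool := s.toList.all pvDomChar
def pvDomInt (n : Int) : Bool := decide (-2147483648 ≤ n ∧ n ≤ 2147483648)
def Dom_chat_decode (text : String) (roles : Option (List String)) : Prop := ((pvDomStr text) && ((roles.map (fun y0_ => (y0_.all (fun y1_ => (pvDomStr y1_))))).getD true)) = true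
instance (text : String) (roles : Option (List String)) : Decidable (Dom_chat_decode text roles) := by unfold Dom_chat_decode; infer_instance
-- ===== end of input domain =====

-- B replaces A's stateful accumulator-and-flush loop by index-based greedy grouping
-- (skip to the first role header, then slice content between consecutive headers); alternative, same cost.

-- shared: both Pythons build the same message dict {"role": r, "content": '\n'.join(c).strip()}
def pvMsg (r : String) (c : List String) : List (String × String) :=
  [("role", r), ("content", PySem.Str.strip (PySem.Str.join "\n" c))]

-- ===== PORT A =====
-- A's for-loop with state (current_role, current_content, messages) and the final flush
def chatLoopA (roles : List String) : List String → Option String → List String →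
    List (List (String × String)) → List (List (String × String))
  | [], cr, cc, msgs =>
    match cr with
    | none => msgs
    | some r => msgs ++ [pvMsg r cc]
  | l :: ls, cr, cc, msgs =>
    if roles.contains l then
      match cr with
      | none => chatLoopA roles ls (some l) [] msgs
      | some r => chatLoopA roles ls (some l) [] (msgs ++ [pvMsg r cc])
    else
      chatLoopA roles ls cr (cc ++ [l]) msgs

def chat_decode (text : String) (roles : Option (List String)) : List (List (String × String)) :=
  let rs := roles.getD ["system", "user", "assistant"]
  let lines := (PySem.Str.split? (PySem.Str.strip text) "\n").getD []
  chatLoopA rs lines none [] []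

-- ===== PORT B =====
-- B's outer while: head is a role header; inner while scans (takeWhile) to the next header
def chatGroupsB (roles : List String) : List String → List (List (String × String))
  | [] => []
  | r :: rest =>
    pvMsg r (rest.takeWhile (fun l => !roles.contains l)) ::
      chatGroupsB roles (rest.dropWhile (fun l => !roles.contains l))
termination_by ls => ls.length
decreasing_by
  have := List.length_dropWhile_le (p := fun l => !roles.contains l) (l := rest)
  simp only [List.length_cons, List.contains_eq_mem] at this ⊢
  omega

def chat_decode_alt (text : String) (roles : Option (List String)) : List (List (String × String)) :=
  let rs := roles.getD ["system", "user", "assistant"]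
  let lines := (PySem.Str.split? (PySem.Str.strip text) "\n").getD []
  chatGroupsB rs (lines.dropWhile (fun l => !rs.contains l))

-- ===== PRECONDITION & SPEC =====
def Spec_chat_decode (text : String) (roles : Option (List String)) (out : List (List (String × String))) : Prop := out = chat_decode_alt text roles
instance (text : String) (roles : Option (List String)) (out : List (List (String × String))) : Decidable (Spec_chat_decode text roles out) := by unfold Spec_chat_decode; infer_instance

-- ===== CLAIM (what is proved, stated in full; the proofs are below) =====
def Claim_equal_chat_decode : Prop := ∀ (text : String) (roles : Option (List String)), Dom_chat_decode text roles → Spec_chat_decode text roles (chat_decode text roles)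

-- ===== LEMMAS AND PROOFS =====

-- A's loop with a pending role r: the pending content absorbs the lines up to the next header,
-- and the rest is B's grouping.
lemma chatLoopA_some (roles : List String) (ls : List String) :
    ∀ (r : String) (cc : List String) (msgs : List (List (String × String))),
      chatLoopA roles ls (some r) cc msgs =
        msgs ++ pvMsg r (cc ++ ls.takeWhile (fun l => !roles.contains l)) ::
          chatGroupsB roles (ls.dropWhile (fun l => !roles.contains l)) := by
  induction ls with
  | nil => intro r cc msgs; unfold chatGroupsB; simp [chatLoopA]
  | cons l ls ih =>
    intro r cc msgs
    by_cases h : l ∈ roles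
    · rw [show (l :: ls).takeWhile (fun l => !roles.contains l) = [] from by simp [h],
          show (l :: ls).dropWhile (fun l => !roles.contains l) = l :: ls from by simp [h],
          chatGroupsB]
      simp [chatLoopA, h, ih]
    · rw [show (l :: ls).takeWhile (fun l => !roles.contains l)
            = l :: ls.takeWhile (fun l => !roles.contains l) from by simp [h],
          show (l :: ls).dropWhile (fun l => !roles.contains l)
            = ls.dropWhile (fun l => !roles.contains l) from by simp [h]]
      simp [chatLoopA, h, ih]

-- A's loop with no pending role: leading non-header lines are discarded.
lemma chatLoopA_none (roles : List String) (ls : List String) :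
    ∀ (cc : List String) (msgs : List (List (String × String))),
      chatLoopA roles ls none cc msgs =
        msgs ++ chatGroupsB roles (ls.dropWhile (fun l => !roles.contains l)) := by
  induction ls with
  | nil => intro cc msgs; unfold chatGroupsB; simp [chatLoopA]
  | cons l ls ih =>
    intro cc msgs
    by_cases h : l ∈ roles
    · rw [show (l :: ls).dropWhile (fun l => !roles.contains l) = l :: ls from by simp [h],
          chatGroupsB]
      simp [chatLoopA, h, chatLoopA_some]
    · rw [show (l :: ls).dropWhile (fun l => !roles.contains l)
            = ls.dropWhile (fun l => !roles.contains l) from by simp [h]]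
      simp [chatLoopA, h, ih]

-- ===== VERDICT (by name: the statement is the Claim_ definition above) =====
theorem chat_decode_spec : Claim_equal_chat_decode := by
  intro text roles _
  unfold Spec_chat_decode chat_decode chat_decode_alt
  simp [chatLoopA_none]
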